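-- pv_equiv track=rewrite | github.com/ElliottSax/engineer | training_iterations/training_iteration114.py | coin_change_path
-- ===== SOURCE A (Python) =====
-- def coin_change_path(coins, amount):
--     """Find minimum coins and which coins to use."""
--     dp = [float('inf')] * (amount + 1)
--     parent = [-1] * (amount + 1)
--     dp[0] = 0
--
--     for i in range(1, amount + 1):
--         for c in coins:
--             if c <= i and dp[i - c] + 1 < dp[i]:
--                 dp[i] = dp[i - c] + 1
--                 parent[i] = c
--
--     if dp[amount] == float('inf'):
--         return -1, []
--
--     # Reconstruct
--     result = []
--     curr = amount
--     while curr > 0: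
--         result.append(parent[curr])
--         curr -= parent[curr]
--
--     return dp[amount], result
-- ===== SOURCE B (Python) =====
-- def coin_change_path(coins, amount):
--     """Find minimum coins and which coins to use."""
--     # Minimum-coin counts for the reachable sub-amounts only, kept in a dict;
--     # no parent array: the path is reconstructed by re-scanning the coins for
--     # the first one that achieves the minimum at each step.
--     dp = {0: 0}
--     for i in range(1, amount + 1):
--         best = None
--         for c in coins:
--             if c <= i and (i - c) in dp:
--                 v = dp[i - c] + 1
--                 if best is None or v < best:
--                     best = v
--         if best is not None:
--             dp[i] = best
--
--     if amount not in dp: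
--         return -1, []
--
--     result = []
--     curr = amount
--     while curr > 0:
--         for c in coins:
--             if c <= curr and (curr - c) in dp and dp[curr - c] + 1 == dp[curr]:
--                 result.append(c)
--                 curr -= c
--                 break
--
--     return dp[amount], result
-- ===== Notes on version B (the rewrite author's own statement) =====
-- stated objective: alternative
-- what changed: B eliminates A's parent array and infinity-filled dp list: it keeps minimum-coin counts for the reachable sub-amounts only in a dict, and reconstructs the path by re-scanning the coins at each step for the first coin achieving the minimum instead of following stored parents.
import Mathlib
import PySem

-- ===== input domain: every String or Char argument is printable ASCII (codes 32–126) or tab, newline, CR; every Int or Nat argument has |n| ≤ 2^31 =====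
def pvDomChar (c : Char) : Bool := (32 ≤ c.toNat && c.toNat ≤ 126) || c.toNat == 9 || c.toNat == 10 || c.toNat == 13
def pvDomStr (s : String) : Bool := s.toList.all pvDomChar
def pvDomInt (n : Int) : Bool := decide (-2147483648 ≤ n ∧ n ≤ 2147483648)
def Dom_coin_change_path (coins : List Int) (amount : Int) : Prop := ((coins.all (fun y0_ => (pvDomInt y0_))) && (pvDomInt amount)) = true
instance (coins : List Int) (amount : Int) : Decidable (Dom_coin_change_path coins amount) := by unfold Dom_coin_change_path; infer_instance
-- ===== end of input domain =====

-- B drops A's parent array and infinity-filled dp list: it keeps the reachable sub-amounts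
-- in a dict and reconstructs the path by re-scanning the coins at each step (objective:
-- alternative, same asymptotic cost as A).

-- ===== PORT A =====
-- float('inf') is modeled as `none : Option Int` (every finite dp entry is an int);
-- these two helpers are exact for A's uses of `+ 1` and `<` on int-or-infinity values.

def pvInfAdd1 : Option Int → Option Int
  | none => none
  | some v => some (v + 1)

def pvInfLT : Option Int → Option Int → Bool
  | none, _ => false
  | some _, none => true
  | some a, some b => decide (a < b)

-- one iteration of A's inner `for c in coins` (state: the dp and parent lists);
-- the `none` branch of the dp[i-c] read is Python's IndexError (excluded by Pre_).
def pvStepA (i : Int) (s : List (Option Int) × List Int) (c : Int) : List (Option Int) × List Int :=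
  if c ≤ i then
    match PySem.List.pyGet? s.1 (i - c) with
    | none => s
    | some x =>
      if pvInfLT (pvInfAdd1 x) ((PySem.List.pyGet? s.1 i).getD none) then
        (s.1.set i.toNat (pvInfAdd1 x), s.2.set i.toNat c)
      else s
  else s

-- A's `while curr > 0`, fuel-guarded for totality; inside Pre_ the loop runs at
-- most `amount` times, so fuel `amount+1` never runs out there.
def pvReconA (par : List Int) : Nat → Int → List Int → List Int
  | 0, _, acc => acc.reverse
  | fuel + 1, curr, acc =>
    if 0 < curr then
      let p := (PySem.List.pyGet? par curr).getD 0
      pvReconA par fuel (curr - p) (p :: acc)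
    else acc.reverse

def coin_change_path (coins : List Int) (amount : Int) : Int × List Int :=
  let dp0 := (List.replicate (amount + 1).toNat (none : Option Int)).set 0 (some 0)
  let par0 := List.replicate (amount + 1).toNat (-1 : Int)
  let st := (PySem.List.pyRange 1 (amount + 1) 1).foldl
      (fun s i => coins.foldl (pvStepA i) s) (dp0, par0)
  match (PySem.List.pyGet? st.1 amount).getD none with
  | none => (-1, [])
  | some v => (v, pvReconA st.2 (amount + 1).toNat amount [])

-- ===== PORT B =====
-- one iteration of B's inner `for c in coins` maintaining `best` (None = no candidate yet)
def pvStepB (dp : PySem.Dict Int Int) (i : Int) (best : Option Int) (c : Int) : Option Int :=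
  if c ≤ i then
    match PySem.Dict.get? dp (i - c) with
    | some w =>
      match best with
      | none => some (w + 1)
      | some b => if w + 1 < b then some (w + 1) else best
    | none => best
  else best

-- B's reconstruction scan `for c in coins: ... break`, as a first-match search
def pvPickB (dp : PySem.Dict Int Int) (coins : List Int) (curr : Int) : Option Int :=
  coins.find? (fun c => decide (c ≤ curr) &&
    ((PySem.Dict.get? dp (curr - c)).elim false (fun w =>
      (PySem.Dict.get? dp curr).elim false (fun v => w + 1 == v))))

-- fuel-guarded `while curr > 0`; the `none` branch of the pick never fires inside Pre_
def pvReconB (dp : PySem.Dict Int Int) (coins : List Int) : Nat → Int → List Int → List Int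
  | 0, _, acc => acc.reverse
  | fuel + 1, curr, acc =>
    if 0 < curr then
      match pvPickB dp coins curr with
      | some c => pvReconB dp coins fuel (curr - c) (c :: acc)
      | none => acc.reverse
    else acc.reverse

-- tget gives some only inside the list

def coin_change_path_alt (coins : List Int) (amount : Int) : Int × List Int :=
  let dp := (PySem.List.pyRange 1 (amount + 1) 1).foldl
      (fun dp i =>
        match coins.foldl (pvStepB dp i) none with
        | some v => dp.insert i v
        | none => dp)
      ((PySem.Dict.empty).insert 0 0)
  match PySem.Dict.get? dp amount with
  | none => (-1, [])
  | some v => (v, pvReconB dp coins (amount + 1).toNat amount [])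

-- ===== PRECONDITION & SPEC =====
-- Pre_ excludes exactly the inputs on which Python A raises IndexError: amount < 0
-- (dp[0] = 0 on an empty list), or amount ≥ 1 together with a negative coin
-- (dp[i - c] is read past the end of dp). A returns normally on all other inputs.
def Pre_coin_change_path (coins : List Int) (amount : Int) : Prop :=
  0 ≤ amount ∧ (amount = 0 ∨ ∀ c ∈ coins, 0 ≤ c)
instance (coins : List Int) (amount : Int) : Decidable (Pre_coin_change_path coins amount) := by unfold Pre_coin_change_path; infer_instance

def pvWitness_coin_change_path : List Int × Int := ([1, 2, 5], 11)

def Spec_coin_change_path (coins : List Int) (amount : Int) (out : Int × List Int) : Prop := out = coin_change_path_alt coins amount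
instance (coins : List Int) (amount : Int) (out : Int × List Int) : Decidable (Spec_coin_change_path coins amount out) := by unfold Spec_coin_change_path; infer_instance

-- ===== CLAIM (what is proved, stated in full; the proofs are below) =====
def Claim_equal_coin_change_path : Prop := ∀ (coins : List Int) (amount : Int), Dom_coin_change_path coins amount → Pre_coin_change_path coins amount → Spec_coin_change_path coins amount (coin_change_path coins amount)

-- ===== LEMMAS AND PROOFS =====

-- table lookup with `none` (= inf / absent) out of range
def tget (t : List (Option Int)) (j : Int) : Option Int :=
  if 0 ≤ j then t.getD j.toNat none else none

-- candidate value dp[i-c]+1 contributed by coin c at sub-amount i (none = no candidate)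
def pvCand (t : List (Option Int)) (i c : Int) : Option Int :=
  if c ≤ i then pvInfAdd1 (tget t (i - c)) else none

-- the shared shape of both inner loops, over a frozen table of smaller dp values
def refStep (t : List (Option Int)) (i : Int) (s : Option Int × Int) (c : Int) : Option Int × Int :=
  if pvInfLT (pvCand t i c) s.1 then (pvCand t i c, c) else s

-- reference tables of dp values and parents for sub-amounts 0..k
def build (coins : List Int) : Nat → List (Option Int) × List Int
  | 0 => ([some 0], [-1])
  | k + 1 =>
    let b := build coins k
    let r := coins.foldl (refStep b.1 ((k : Int) + 1)) (none, -1)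
    (b.1 ++ [r.1], b.2 ++ [r.2])

theorem build_len (coins : List Int) (k : Nat) :
    (build coins k).1.length = k + 1 ∧ (build coins k).2.length = k + 1 := by
  induction k with
  | zero => simp [build]
  | succ k ih => simp [build, ih.1, ih.2]

theorem pvInfLT_add1_self (d : Option Int) : pvInfLT (pvInfAdd1 d) d = false := by
  cases d <;> simp [pvInfAdd1, pvInfLT]

theorem pvInfLT_none_left (x : Option Int) : pvInfLT none x = false := rfl


theorem set_append_len {α : Type} (l : List α) (a x : α) (r : List α) :
    (l ++ a :: r).set l.length x = l ++ x :: r := by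
  induction l with
  | nil => rfl
  | cons h tl ih => simp [ih]

theorem stepA_cong (t : List (Option Int)) (p2 : List Int) (hp : p2.length = t.length)
    (d : Option Int) (q : Int) (m : Nat) (c : Int) :
    pvStepA (t.length : Int) (t ++ d :: List.replicate m none, p2 ++ q :: List.replicate m (-1)) c
      = (t ++ (refStep t (t.length : Int) (d, q) c).1 :: List.replicate m none,
         p2 ++ (refStep t (t.length : Int) (d, q) c).2 :: List.replicate m (-1)) := by
  have hgetI : PySem.List.pyGet? (t ++ d :: List.replicate m none) (t.length : Int) = some d :=
    PySem.List.pyGet?_append_length t (List.replicate m none) d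
  have htoNat : ((t.length : Int)).toNat = t.length := by omega
  by_cases hc : c ≤ (t.length : Int)
  case neg =>
    unfold pvStepA refStep pvCand
    rw [if_neg hc, if_neg hc]
    simp [pvInfLT]
  case pos =>
  have hj0 : 0 ≤ (t.length : Int) - c := by omega
  have hread : PySem.List.pyGet? (t ++ d :: List.replicate m none) ((t.length : Int) - c)
      = (t ++ d :: List.replicate m none)[((t.length : Int) - c).toNat]? :=
    PySem.List.pyGet?_of_nonneg _ hj0
  rcases lt_or_ge c 1 with h1 | h1
  · rcases lt_or_ge c 0 with h2 | h2
    · -- c < 0 : the read lands past index t.length, both sides no-op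
      have hcand : pvCand t (t.length : Int) c = none := by
        unfold pvCand tget
        rw [if_pos hc, if_pos hj0, List.getD_eq_default t none (n := ((t.length : Int) - c).toNat) (by omega)]
        rfl
      obtain ⟨k, hk⟩ : ∃ k, ((t.length : Int) - c).toNat = t.length + 1 + k := ⟨((t.length : Int) - c).toNat - t.length - 1, by omega⟩
      rw [hk, List.getElem?_append_right (by omega)] at hread
      have hidx : t.length + 1 + k - t.length = k + 1 := by omega
      rw [hidx, List.getElem?_cons_succ, List.getElem?_replicate] at hread
      unfold pvStepA refStep
      rw [hcand, if_pos hc, hread]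
      by_cases hm : k < m
      · rw [if_pos hm]
        simp [pvInfAdd1, pvInfLT]
      · rw [if_neg hm]
        simp [pvInfLT]
    · -- c = 0 : reads the cell being written, never a strict improvement
      have hc0 : c = 0 := by omega
      subst hc0
      have hcand : pvCand t (t.length : Int) 0 = none := by
        unfold pvCand tget
        rw [if_pos hc, if_pos hj0]
        simp only [sub_zero, htoNat]
        rw [List.getD_eq_default t none (le_refl _)]
        rfl
      unfold pvStepA refStep
      rw [hcand, if_pos hc]
      simp only [sub_zero, hgetI, Option.getD_some, pvInfLT_none_left, pvInfLT_add1_self]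
      simp
  · -- 1 ≤ c ≤ t.length : genuine candidate read at index t.length - c < t.length
    have hjn : ((t.length : Int) - c).toNat < t.length := by omega
    rw [List.getElem?_append_left hjn, List.getElem?_eq_getElem hjn] at hread
    have hcand : pvCand t (t.length : Int) c = pvInfAdd1 (t[((t.length : Int) - c).toNat]) := by
      unfold pvCand tget
      rw [if_pos hc, if_pos hj0, List.getD_eq_getElem?_getD, List.getElem?_eq_getElem hjn]
      rfl
    unfold pvStepA refStep
    rw [hcand, if_pos hc, hread, hgetI]
    simp only [Option.getD_some]
    by_cases hlt : pvInfLT (pvInfAdd1 t[((t.length : Int) - c).toNat]) d = true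
    · rw [if_pos hlt, if_pos hlt, htoNat, set_append_len]
      have hset2 : (p2 ++ q :: List.replicate m (-1 : Int)).set t.length c
          = p2 ++ c :: List.replicate m (-1) := by
        rw [← hp]
        exact set_append_len p2 q c _
      rw [hset2]
    · rw [if_neg hlt, if_neg hlt]

theorem foldA_cong (t : List (Option Int)) (p2 : List Int) (hp : p2.length = t.length)
    (cs : List Int) (d : Option Int) (q : Int) (m : Nat) :
    cs.foldl (pvStepA (t.length : Int)) (t ++ d :: List.replicate m none, p2 ++ q :: List.replicate m (-1))
      = (t ++ (cs.foldl (refStep t (t.length : Int)) (d, q)).1 :: List.replicate m none,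
         p2 ++ (cs.foldl (refStep t (t.length : Int)) (d, q)).2 :: List.replicate m (-1)) := by
  induction cs generalizing d q with
  | nil => rfl
  | cons c cs ih =>
    simp only [List.foldl_cons]
    rw [stepA_cong t p2 hp d q m c,
        ih (refStep t (t.length : Int) (d, q) c).1 (refStep t (t.length : Int) (d, q) c).2]

theorem outerA (coins : List Int) (n k : Nat) (hk : k ≤ n) :
    (PySem.List.pyRange 1 ((k : Int) + 1) 1).foldl (fun s i => coins.foldl (pvStepA i) s)
        ((List.replicate (n + 1) (none : Option Int)).set 0 (some 0), List.replicate (n + 1) (-1 : Int))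
      = ((build coins k).1 ++ List.replicate (n - k) none,
         (build coins k).2 ++ List.replicate (n - k) (-1)) := by
  induction k with
  | zero =>
    rw [show ((0 : Nat) : Int) + 1 = 1 by norm_num, PySem.List.pyRange_one_eq_nil (le_refl _)]
    simp [build, List.replicate_succ]
  | succ k ih =>
    rw [show (((k + 1 : Nat)) : Int) + 1 = ((k : Int) + 1) + 1 by push_cast; ring,
        PySem.List.pyRange_one_succ_right (by omega), List.foldl_append, ih (by omega)]
    simp only [List.foldl_cons, List.foldl_nil]
    have hrep : n - k = (n - (k + 1)) + 1 := by omega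
    rw [hrep, List.replicate_succ, List.replicate_succ]
    have hlen := (build_len coins k).1
    have hlen2 := (build_len coins k).2
    have hcast : (k : Int) + 1 = ((build coins k).1.length : Int) := by rw [hlen]; push_cast; ring
    rw [hcast, foldA_cong (build coins k).1 (build coins k).2 (by omega)]
    show (_ ++ _ :: _, _ ++ _ :: _) = _
    simp only [build, ← hcast]
    simp

theorem stepB_cong (dp : PySem.Dict Int Int) (t : List (Option Int))
    (hinv : ∀ j, PySem.Dict.get? dp j = tget t j) (i : Int) (c : Int) (best : Option Int) (q : Int) :
    pvStepB dp i best c = (refStep t i (best, q) c).1 := by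
  unfold pvStepB refStep pvCand
  by_cases hc : c ≤ i
  · rw [if_pos hc, if_pos hc, hinv (i - c)]
    cases htg : tget t (i - c) with
    | none => simp [pvInfAdd1, pvInfLT]
    | some w =>
      cases best with
      | none => simp [pvInfAdd1, pvInfLT]
      | some b =>
        simp only [pvInfAdd1, pvInfLT]
        by_cases hlt : w + 1 < b
        · rw [if_pos hlt, if_pos (by simpa using hlt)]
        · rw [if_neg hlt, if_neg (by simpa using hlt)]
  · rw [if_neg hc, if_neg hc]
    simp [pvInfLT]

theorem foldB_cong (dp : PySem.Dict Int Int) (t : List (Option Int))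
    (hinv : ∀ j, PySem.Dict.get? dp j = tget t j) (i : Int)
    (cs : List Int) (best : Option Int) (q : Int) :
    cs.foldl (pvStepB dp i) best = (cs.foldl (refStep t i) (best, q)).1 := by
  induction cs generalizing best q with
  | nil => rfl
  | cons c cs ih =>
    simp only [List.foldl_cons]
    rw [stepB_cong dp t hinv i c best q]
    have := ih (refStep t i (best, q) c).1 (refStep t i (best, q) c).2
    exact this

theorem tget_append (t : List (Option Int)) (x : Option Int) (j : Int) :
    tget (t ++ [x]) j = if j = (t.length : Int) then x else tget t j := by
  unfold tget
  by_cases h0 : 0 ≤ j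
  · simp only [if_pos h0]
    rcases lt_trichotomy j.toNat t.length with h | h | h
    · rw [if_neg (by omega)]
      simp [List.getD_eq_getElem?_getD, List.getElem?_append_left h]
    · rw [if_pos (by omega)]
      simp [List.getD_eq_getElem?_getD, h]
    · rw [if_neg (by omega)]
      simp only [List.getD_eq_getElem?_getD]
      rw [List.getElem?_eq_none (by simp; omega), List.getElem?_eq_none (by omega)]
  · simp only [if_neg h0]
    rw [if_neg (by omega)]

theorem outerB (coins : List Int) (k : Nat) :
    ∀ j, PySem.Dict.get? ((PySem.List.pyRange 1 ((k : Int) + 1) 1).foldl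
      (fun dp i =>
        match coins.foldl (pvStepB dp i) none with
        | some v => dp.insert i v
        | none => dp)
      ((PySem.Dict.empty).insert 0 0)) j = tget (build coins k).1 j := by
  induction k with
  | zero =>
    intro j
    rw [show ((0 : Nat) : Int) + 1 = 1 by norm_num, PySem.List.pyRange_one_eq_nil (le_refl _)]
    simp only [List.foldl_nil]
    rw [PySem.Dict.get?_insert]
    unfold tget build
    by_cases hj : j = 0
    · subst hj; simp
    · rw [if_neg hj, PySem.Dict.get?_empty]
      by_cases h0 : 0 ≤ j
      · rw [if_pos h0, List.getD_eq_getElem?_getD, List.getElem?_eq_none (by simp; omega)]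
        rfl
      · rw [if_neg h0]
  | succ k ih =>
    intro j
    rw [show (((k + 1 : Nat)) : Int) + 1 = ((k : Int) + 1) + 1 by push_cast; ring,
        PySem.List.pyRange_one_succ_right (by omega), List.foldl_append]
    simp only [List.foldl_cons, List.foldl_nil]
    set dpk := (PySem.List.pyRange 1 ((k : Int) + 1) 1).foldl
      (fun dp i =>
        match coins.foldl (pvStepB dp i) none with
        | some v => dp.insert i v
        | none => dp)
      ((PySem.Dict.empty).insert 0 0) with hdpk
    have hfold := foldB_cong dpk (build coins k).1 ih ((k : Int) + 1) coins none (-1)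
    rw [hfold]
    have hb : (build coins (k + 1)).1 = (build coins k).1 ++ [(coins.foldl (refStep (build coins k).1 ((k : Int) + 1)) (none, -1)).1] := by
      simp [build]
    rw [hb, tget_append]
    have hlen : ((build coins k).1.length : Int) = (k : Int) + 1 := by
      have := (build_len coins k).1; rw [this]; push_cast; ring
    rw [hlen]
    cases hr : (coins.foldl (refStep (build coins k).1 ((k : Int) + 1)) (none, -1)).1 with
    | none =>
      rw [ih j]
      by_cases hj : j = (k : Int) + 1
      · rw [if_pos hj]
        subst hj
        unfold tget
        rw [if_pos (by omega), List.getD_eq_default _ none (by have := (build_len coins k).1; omega)]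
      · rw [if_neg hj]
    | some v =>
      rw [PySem.Dict.get?_insert, ih j]

theorem refFold_char (t : List (Option Int)) (i : Int) (cs : List Int) :
    (∀ c ∈ cs, pvInfLT (pvCand t i c) (cs.foldl (refStep t i) (none, -1)).1 = false)
    ∧ ((cs.foldl (refStep t i) (none, -1)).1 = none → (cs.foldl (refStep t i) (none, -1)).2 = -1)
    ∧ (∀ v, (cs.foldl (refStep t i) (none, -1)).1 = some v →
        cs.find? (fun c => pvCand t i c == some v) = some (cs.foldl (refStep t i) (none, -1)).2) := by
  induction cs using List.reverseRecOn with
  | nil => simp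
  | append_singleton cs c ih =>
    rw [List.foldl_append, List.foldl_cons, List.foldl_nil]
    obtain ⟨ihmin, ihnone, ihfind⟩ := ih
    set r := cs.foldl (refStep t i) (none, -1) with hr
    show (∀ c' ∈ cs ++ [c], pvInfLT (pvCand t i c') (refStep t i r c).1 = false) ∧ _ ∧ _
    unfold refStep
    by_cases hlt : pvInfLT (pvCand t i c) r.1 = true
    · rw [if_pos hlt]
      obtain ⟨v', hv'⟩ : ∃ v', pvCand t i c = some v' := by
        cases h : pvCand t i c
        · rw [h] at hlt; exact absurd hlt (by simp [pvInfLT])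
        · exact ⟨_, rfl⟩
      refine ⟨?_, by simp [hv'], ?_⟩
      · intro c' hc'
        rcases List.mem_append.1 hc' with h | h
        · have hmin := ihmin c' h
          cases hcc : pvCand t i c' with
          | none => rfl
          | some w =>
            rw [hcc] at hmin
            rw [hv']
            cases hr1 : r.1 with
            | none => rw [hr1] at hmin; simp [pvInfLT] at hmin
            | some u =>
              rw [hr1] at hmin
              rw [hv', hr1] at hlt
              simp only [pvInfLT, decide_eq_false_iff_not] at hmin
              simp only [pvInfLT, decide_eq_true_eq] at hlt
              simp only [pvInfLT, decide_eq_false_iff_not]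
              simp
              omega
        · simp only [List.mem_singleton] at h
          subst h
          rw [hv']
          simp [pvInfLT]
      · intro v hv
        simp only at hv
        rw [hv'] at hv
        obtain rfl : v = v' := by simpa using hv.symm
        rw [List.find?_append]
        have hnone : cs.find? (fun c' => pvCand t i c' == some v) = none := by
          rw [List.find?_eq_none]
          intro x hx hpx
          have := ihmin x hx
          rw [(by simpa using hpx : pvCand t i x = some v)] at this
          rw [hv'] at hlt
          cases hr1 : r.1 with
          | none => rw [hr1] at this; simp [pvInfLT] at this
          | some u =>
            rw [hr1] at this hlt
            simp only [pvInfLT, decide_eq_false_iff_not] at this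
            simp only [pvInfLT, decide_eq_true_eq] at hlt
            omega
        rw [hnone]
        simp [hv']
    · rw [if_neg hlt]
      refine ⟨?_, ihnone, ?_⟩
      · intro c' hc'
        rcases List.mem_append.1 hc' with h | h
        · exact ihmin c' h
        · simp only [List.mem_singleton] at h
          subst h
          simpa using hlt
      · intro v hv
        rw [List.find?_append, ihfind v hv]
        rfl

theorem build_prefix (coins : List Int) (k n : Nat) (hk : k ≤ n) :
    (build coins k).1 <+: (build coins n).1 ∧ (build coins k).2 <+: (build coins n).2 := by
  induction n with
  | zero =>
    cases Nat.le_zero.mp hk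
    exact ⟨List.prefix_refl _, List.prefix_refl _⟩
  | succ n ih =>
    by_cases h : k = n + 1
    · subst h; exact ⟨List.prefix_refl _, List.prefix_refl _⟩
    · have := ih (by omega)
      constructor
      · exact this.1.trans (by simp [build])
      · exact this.2.trans (by simp [build])

theorem tget_prefix (coins : List Int) (k n : Nat) (hk : k ≤ n) (j : Int)
    (hj : 0 ≤ j) (hjk : j.toNat ≤ k) :
    tget (build coins n).1 j = tget (build coins k).1 j := by
  obtain ⟨s, hs⟩ := (build_prefix coins k n hk).1
  unfold tget
  rw [if_pos hj, if_pos hj, ← hs]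
  simp only [List.getD_eq_getElem?_getD]
  rw [List.getElem?_append_left (by rw [(build_len coins k).1]; omega)]

theorem tentry (coins : List Int) (k n : Nat) (hk : k + 1 ≤ n) :
    tget (build coins n).1 ((k : Int) + 1)
      = (coins.foldl (refStep (build coins k).1 ((k : Int) + 1)) (none, -1)).1 := by
  rw [tget_prefix coins (k+1) n hk _ (by omega) (by omega)]
  unfold tget
  rw [if_pos (by omega)]
  have h1 : ((k : Int) + 1).toNat = k + 1 := by omega
  rw [h1]
  show ((build coins k).1 ++ [_]).getD (k+1) none = _
  rw [List.getD_eq_getElem?_getD,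
      List.getElem?_append_right (by rw [(build_len coins k).1])]
  simp [(build_len coins k).1]


theorem pentry (coins : List Int) (k n : Nat) (hk : k + 1 ≤ n) :
    PySem.List.pyGet? (build coins n).2 ((k : Int) + 1)
      = some (coins.foldl (refStep (build coins k).1 ((k : Int) + 1)) (none, -1)).2 := by
  obtain ⟨s, hs⟩ := (build_prefix coins (k+1) n hk).2
  rw [PySem.List.pyGet?_of_nonneg _ (by omega)]
  have h1 : ((k : Int) + 1).toNat = k + 1 := by omega
  rw [h1, ← hs, List.getElem?_append_left (by rw [(build_len coins (k+1)).2]; omega)]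
  show ((build coins k).2 ++ [_])[k+1]? = _
  rw [List.getElem?_append_right (by rw [(build_len coins k).2])]
  simp [(build_len coins k).2]

theorem find?_congr_mem {α : Type} (l : List α) (p q : α → Bool)
    (h : ∀ x ∈ l, p x = q x) : l.find? p = l.find? q := by
  induction l with
  | nil => rfl
  | cons a l ih =>
    rw [List.find?_cons, List.find?_cons, h a (by simp)]
    cases q a
    · exact ih (fun x hx => h x (by simp [hx]))
    · rfl

theorem tget_some_bounds (t : List (Option Int)) (j : Int) (w : Int)
    (h : tget t j = some w) : 0 ≤ j ∧ j.toNat < t.length := by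
  unfold tget at h
  by_cases h0 : 0 ≤ j
  · refine ⟨h0, ?_⟩
    by_contra hlen
    rw [if_pos h0, List.getD_eq_default t none (by omega)] at h
    simp at h
  · rw [if_neg h0] at h; simp at h

theorem recon_eq (coins : List Int) (n : Nat) (dpn : PySem.Dict Int Int)
    (hinv : ∀ j, PySem.Dict.get? dpn j = tget (build coins n).1 j)
    (hc : ∀ c ∈ coins, 0 ≤ c) :
    ∀ fuel (curr : Int) acc, 0 ≤ curr → curr.toNat ≤ n →
      (tget (build coins n).1 curr).isSome →
      pvReconA (build coins n).2 fuel curr acc = pvReconB dpn coins fuel curr acc := by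
  intro fuel
  induction fuel with
  | zero => intro curr acc _ _ _; rfl
  | succ fuel ih =>
    intro curr acc h0 hn hsome
    unfold pvReconA pvReconB
    by_cases hpos : 0 < curr
    case neg => rw [if_neg hpos, if_neg hpos]
    case pos =>
    rw [if_pos hpos, if_pos hpos]
    obtain ⟨v, hv⟩ := Option.isSome_iff_exists.mp hsome
    obtain ⟨k, hk⟩ : ∃ k : Nat, curr = (k : Int) + 1 := ⟨(curr - 1).toNat, by omega⟩
    have hkn : k + 1 ≤ n := by omega
    set tk := (build coins k).1 with htk
    set r := coins.foldl (refStep tk ((k : Int) + 1)) (none, -1) with hrdef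
    have hr1 : r.1 = some v := by
      rw [← tentry coins k n hkn, ← hk, hv]
    have hfind := (refFold_char tk ((k : Int) + 1) coins).2.2 v hr1
    have hmem : r.2 ∈ coins := List.mem_of_find?_eq_some hfind
    have hpred := List.find?_some hfind
    have hcandp : pvCand tk ((k : Int) + 1) r.2 = some v := by simpa using hpred
    -- unpack the candidate
    have hple : r.2 ≤ (k : Int) + 1 := by
      by_contra hgt
      unfold pvCand at hcandp
      rw [if_neg hgt] at hcandp
      simp at hcandp
    have htgt : tget tk ((k : Int) + 1 - r.2) = some (v - 1) := by
      unfold pvCand at hcandp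
      rw [if_pos hple] at hcandp
      cases htg : tget tk ((k : Int) + 1 - r.2) with
      | none => rw [htg] at hcandp; simp [pvInfAdd1] at hcandp
      | some w =>
        rw [htg] at hcandp
        simp only [pvInfAdd1, Option.some.injEq] at hcandp
        rw [← hcandp]
        simp
    obtain ⟨hj0, hjlen⟩ := tget_some_bounds _ _ _ htgt
    have htklen : tk.length = k + 1 := (build_len coins k).1
    have hp1 : 1 ≤ r.2 := by omega
    -- A reads its parent array entry
    have hparent : (PySem.List.pyGet? (build coins n).2 curr).getD 0 = r.2 := by
      rw [hk, pentry coins k n hkn]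
      rfl
    -- B finds the same coin
    have hpick : pvPickB dpn coins curr = some r.2 := by
      unfold pvPickB
      rw [find?_congr_mem coins _ (fun c => pvCand tk ((k : Int) + 1) c == some v)]
      · exact hfind
      · intro c hcmem
        have hc0 : 0 ≤ c := hc c hcmem
        by_cases hcc : c ≤ curr
        case neg =>
          have : pvCand tk ((k : Int) + 1) c = none := by
            unfold pvCand
            rw [if_neg (by omega)]
          simp [hcc, this]
        case pos =>
        rw [hinv (curr - c), hinv curr, hv]
        by_cases hcz : c = 0
        · subst hcz
          have h1 : tget (build coins n).1 (curr - 0) = some v := by simpa using hv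
          have h2 : pvCand tk ((k : Int) + 1) 0 = none := by
            unfold pvCand
            rw [if_pos (by omega)]
            unfold tget
            rw [if_pos (by omega), List.getD_eq_default tk none (by omega)]
            rfl
          rw [h1, h2]
          simp
        · have hcge1 : 1 ≤ c := by omega
          have hpre : tget (build coins n).1 (curr - c) = tget tk (curr - c) := by
            rw [htk]
            exact tget_prefix coins k n (by omega) _ (by omega) (by omega)
          rw [hpre]
          have hcand2 : pvCand tk ((k : Int) + 1) c = pvInfAdd1 (tget tk (curr - c)) := by
            unfold pvCand
            rw [if_pos (by omega), ← hk]
          rw [hcand2]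
          cases tget tk (curr - c) with
          | none => simp [hcc, pvInfAdd1]
          | some w => simp [hcc, pvInfAdd1]
    rw [hpick, hparent]
    -- recurse
    have hnext : tget (build coins n).1 (curr - r.2) = some (v - 1) := by
      rw [hk, tget_prefix coins k n (by omega) _ (by omega) (by omega)]
      exact htgt
    exact ih (curr - r.2) (r.2 :: acc) (by omega) (by omega) (by rw [hnext]; rfl)

theorem tget_eq_pyGetD (t : List (Option Int)) (j : Int) (h : 0 ≤ j) :
    (PySem.List.pyGet? t j).getD none = tget t j := by
  rw [PySem.List.pyGet?_of_nonneg _ h]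
  unfold tget
  rw [if_pos h, List.getD_eq_getElem?_getD]

theorem ports_agree (coins : List Int) (amount : Int)
    (h0 : 0 ≤ amount) (hco : amount = 0 ∨ ∀ c ∈ coins, 0 ≤ c) :
    coin_change_path coins amount = coin_change_path_alt coins amount := by
  rcases hco with hz | hc
  · subst hz; rfl
  · obtain ⟨n, rfl⟩ : ∃ n : Nat, amount = (n : Int) := ⟨amount.toNat, by omega⟩
    unfold coin_change_path coin_change_path_alt
    have hfuel : ((n : Int) + 1).toNat = n + 1 := by omega
    have hA := outerA coins n n (le_refl n)
    have hB := outerB coins n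
    simp only [Nat.sub_self, List.replicate_zero, List.append_nil] at hA
    simp only [hfuel, hA, hB]
    rw [tget_eq_pyGetD _ _ (by omega)]
    cases hv : tget (build coins n).1 (n : Int) with
    | none => rfl
    | some v =>
      simp only
      rw [recon_eq coins n _ hB hc (n + 1) (n : Int) [] (by omega) (by omega) (by rw [hv]; rfl)]

-- ===== VERDICT (by name: the statement is the Claim_ definition above) =====
theorem coin_change_path_spec : Claim_equal_coin_change_path := by
  intro coins amount _ hpre
  unfold Spec_coin_change_path
  exact ports_agree coins amount hpre.1 hpre.2
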